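-- pv_equiv track=rewrite | github.com/sheldon123z/AI-Go-Game-Player | my_player3.py | find_max_coord
-- ===== SOURCE A (Python) =====
-- boardSize = 5
--
-- MIN = -9999
--
-- def find_max_coord(q):
--     max_q = MIN
--     row = 0
--     col = 0
--     for i in range(boardSize):
--         for j in range(boardSize):
--             if q[i][j] > max_q:
--                 max_q = q[i][j]
--                 row, col = i, j
--     return row,col
-- ===== SOURCE B (Python) =====
-- boardSize = 5
--
-- MIN = -9999
--
-- def _row_best(r, i):
--     rr = r[:boardSize]
--     v = max(rr)
--     return (v, i, rr.index(v))
--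
-- def find_max_coord(q):
--     summaries = [_row_best(q[i], i) for i in range(boardSize)]
--     best, row, col = MIN, 0, 0
--     for v, i, j in summaries:
--         if v > best:
--             best, row, col = v, i, j
--     return row, col
-- ===== Notes on version B (the rewrite author's own statement) =====
-- stated objective: alternative
-- what changed: Replaces A's flat nested 5x5 scan carrying one global (max,row,col) state by a per-row decomposition: each row is summarised to (max value, row, first column) via max() and list.index(), and the summaries are then reduced across rows.
import Mathlib
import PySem

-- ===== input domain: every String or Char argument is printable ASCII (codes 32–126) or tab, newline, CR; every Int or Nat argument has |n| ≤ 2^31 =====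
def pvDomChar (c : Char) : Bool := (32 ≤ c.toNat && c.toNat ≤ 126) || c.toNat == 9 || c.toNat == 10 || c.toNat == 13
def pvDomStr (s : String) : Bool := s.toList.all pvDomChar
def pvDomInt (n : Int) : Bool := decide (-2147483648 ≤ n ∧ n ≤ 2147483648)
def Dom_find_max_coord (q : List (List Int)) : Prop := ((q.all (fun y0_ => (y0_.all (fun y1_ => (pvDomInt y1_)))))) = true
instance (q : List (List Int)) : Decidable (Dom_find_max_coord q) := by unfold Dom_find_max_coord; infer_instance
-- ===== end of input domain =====

-- B replaces A's flat nested 5×5 scan by per-row summaries (row max + first column via max/index) reduced across rows; alternative decomposition, same asymptotic cost.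

-- ===== PORT A =====
def find_max_coord (q : List (List Int)) : Int × Int :=
  let st :=
    (PySem.List.pyRange 0 5 1).foldl
      (fun (st : Int × Int × Int) i =>
        (PySem.List.pyRange 0 5 1).foldl
          (fun (st : Int × Int × Int) j =>
            if PySem.List.pyGetD (PySem.List.pyGetD q i []) j 0 > st.1 then
              (PySem.List.pyGetD (PySem.List.pyGetD q i []) j 0, i, j)
            else st)
          st)
      ((-9999 : Int), (0 : Int), (0 : Int))
  (st.2.1, st.2.2)

-- ===== PORT B =====
def row_best (r : List Int) (i : Int) : Int × Int × Int :=
  let rr := PySem.List.slice r none (some (5 : Int))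
  match PySem.List.max? rr id with
  | none => ((-9999 : Int), i, (0 : Int))   -- unreachable under Pre_ (Python's max raises on an empty row)
  | some v => (v, i, (((PySem.List.index? rr v).getD 0 : Nat) : Int))

def find_max_coord_alt (q : List (List Int)) : Int × Int :=
  let summaries := (PySem.List.pyRange 0 5 1).map (fun i => row_best (PySem.List.pyGetD q i []) i)
  let st := summaries.foldl
      (fun (st : Int × Int × Int) p => if p.1 > st.1 then p else st)
      ((-9999 : Int), (0 : Int), (0 : Int))
  (st.2.1, st.2.2)

-- ===== PRECONDITION & SPEC =====
-- Pre_ excludes exactly the inputs where Python A raises IndexError: fewer than 5 rows, or one of the first 5 rows shorter than 5.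
def Pre_find_max_coord (q : List (List Int)) : Prop :=
  5 ≤ q.length ∧ ∀ r ∈ q.take 5, 5 ≤ r.length
instance (q : List (List Int)) : Decidable (Pre_find_max_coord q) := by
  unfold Pre_find_max_coord; infer_instance

def pvWitness_find_max_coord : List (List Int) :=
  [[0,1,2,3,4],[5,6,7,8,9],[0,0,0,0,0],[1,1,1,1,1],[2,2,2,2,2]]

def Spec_find_max_coord (q : List (List Int)) (out : Int × Int) : Prop := out = find_max_coord_alt q
instance (q : List (List Int)) (out : Int × Int) : Decidable (Spec_find_max_coord q out) := by
  unfold Spec_find_max_coord; infer_instance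

-- ===== CLAIM (what is proved, stated in full; the proofs are below) =====
def Claim_equal_find_max_coord : Prop :=
  ∀ (q : List (List Int)), Dom_find_max_coord q → Pre_find_max_coord q →
    Spec_find_max_coord q (find_max_coord q)

-- ===== LEMMAS AND PROOFS =====

-- running maximum of a list, seeded (keeps the seed on ties: Python's max / A's strict '>')
def mx (m : Int) (l : List Int) : Int := l.foldl (fun a x => if a < x then x else a) m

theorem mx_cons (m y : Int) (l : List Int) : mx m (y :: l) = mx (if m < y then y else m) l := rfl

theorem mx_ge (l : List Int) : ∀ m : Int, m ≤ mx m l := by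
  induction l with
  | nil => intro m; exact le_refl m
  | cons y t ih =>
    intro m
    rw [mx_cons]
    refine le_trans ?_ (ih _)
    split <;> omega

theorem mx_ge_mem (l : List Int) : ∀ (m : Int), ∀ z ∈ l, z ≤ mx m l := by
  induction l with
  | nil => intro m z hz; cases hz
  | cons y t ih =>
    intro m z hz
    rw [mx_cons]
    rcases List.mem_cons.1 hz with rfl | hz
    · refine le_trans ?_ (mx_ge t _)
      split <;> omega
    · exact ih _ z hz

theorem mx_mem_or (l : List Int) : ∀ m : Int, mx m l = m ∨ mx m l ∈ l := by
  induction l with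
  | nil => intro m; exact Or.inl rfl
  | cons y t ih =>
    intro m
    rw [mx_cons]
    by_cases hm : m < y
    · rw [if_pos hm]
      rcases ih y with h | h
      · exact Or.inr (by rw [h]; exact List.mem_cons_self)
      · exact Or.inr (List.mem_cons_of_mem _ h)
    · rw [if_neg hm]
      rcases ih m with h | h
      · exact Or.inl h
      · exact Or.inr (List.mem_cons_of_mem _ h)

theorem max?_foldl_some (l : List Int) : ∀ m : Int,
    List.foldl
      (fun (acc : Option Int) x =>
        match acc with
        | none => some x
        | some m => if m < x then some x else some m)
      (some m) l = some (mx m l) := by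
  induction l with
  | nil => intro m; rfl
  | cons y t ih =>
    intro m
    rw [List.foldl_cons]
    show List.foldl _ (if m < y then some y else some m) t = some (mx m (y :: t))
    rw [mx_cons]
    by_cases h : m < y
    · rw [if_pos h, if_pos h]; exact ih y
    · rw [if_neg h, if_neg h]; exact ih m

theorem max?_cons (x : Int) (l : List Int) :
    PySem.List.max? (x :: l) id = some (mx x l) := by
  simp only [PySem.List.max?, List.foldl_cons, id_eq]
  convert max?_foldl_some l x using 2
  funext acc z
  cases acc with
  | none => rfl
  | some m => by_cases h : m < z <;> simp [h]

-- A's inner scan over an enumerated row equals B's row summary (max value, first index)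
theorem argmax_fold (l : List Int) : ∀ (x i s : Int) (st : Int × Int × Int),
    (PySem.List.enumerate (x :: l) s).foldl
      (fun (st : Int × Int × Int) p => if p.2 > st.1 then (p.2, i, p.1) else st) st
    = (if mx x l > st.1 then
        (mx x l, i, s + (((PySem.List.index? (x :: l) (mx x l)).getD 0 : Nat) : Int))
      else st) := by
  induction l with
  | nil =>
    intro x i s st
    simp [PySem.List.enumerate, mx, PySem.List.index?_cons_self]
  | cons y t ih =>
    intro x i s st
    have hstep : PySem.List.enumerate (x :: y :: t) s
        = (s, x) :: PySem.List.enumerate (y :: t) (s + 1) := by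
      simp [PySem.List.enumerate]
    rw [hstep, List.foldl_cons]
    rw [ih y i (s + 1) _]
    by_cases hxy : x < y
    · -- the row max is mx y t, strictly above x
      have hval : mx x (y :: t) = mx y t := by rw [mx_cons, if_pos hxy]
      have hygt : x < mx y t := lt_of_lt_of_le hxy (mx_ge t y)
      have hne : x ≠ mx y t := ne_of_lt hygt
      have hidx : PySem.List.index? (x :: y :: t) (mx y t)
          = Option.map (fun k => k + 1) (PySem.List.index? (y :: t) (mx y t)) :=
        PySem.List.index?_cons_of_ne _ hne
      have hmem : mx y t ∈ y :: t := by
        rcases mx_mem_or t y with h | h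
        · rw [h]; exact List.mem_cons_self
        · exact List.mem_cons_of_mem _ h
      obtain ⟨k, hk⟩ := Option.isSome_iff_exists.1 ((PySem.List.index?_isSome_iff _ _).2 hmem)
      rw [hval, hidx, hk]
      simp only [Option.map_some, Option.getD_some]
      by_cases hx1 : x > st.1
      · rw [if_pos hx1]
        have h1 : mx y t > (x, i, s).1 := hygt
        have h2 : mx y t > st.1 := lt_trans hx1 hygt
        rw [if_pos h1, if_pos h2]
        simp; omega
      · rw [if_neg hx1]
        split <;> simp <;> omega
    · -- seed x survives the merge with y
      have hval : mx x (y :: t) = mx x t := by rw [mx_cons, if_neg hxy]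
      by_cases hbig : x < mx y t
      · -- some element of t beats x, both maxima agree
        have hmemt : mx y t ∈ t := by
          rcases mx_mem_or t y with h | h
          · rw [h] at hbig; omega
          · exact h
        have hle1 : mx y t ≤ mx x t := mx_ge_mem t x _ hmemt
        have hle2 : mx x t ≤ mx y t := by
          rcases mx_mem_or t x with h | h
          · rw [h]; omega
          · exact mx_ge_mem t y _ h
        have heq : mx x t = mx y t := le_antisymm hle2 hle1
        have hne : x ≠ mx y t := ne_of_lt hbig
        have hidx : PySem.List.index? (x :: y :: t) (mx y t)
            = Option.map (fun k => k + 1) (PySem.List.index? (y :: t) (mx y t)) :=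
          PySem.List.index?_cons_of_ne _ hne
        have hmem : mx y t ∈ y :: t := List.mem_cons_of_mem _ hmemt
        obtain ⟨k, hk⟩ := Option.isSome_iff_exists.1 ((PySem.List.index?_isSome_iff _ _).2 hmem)
        rw [hval, heq, hidx, hk]
        simp only [Option.map_some, Option.getD_some]
        by_cases hx1 : x > st.1
        · rw [if_pos hx1]
          have h1 : mx y t > (x, i, s).1 := hbig
          have h2 : mx y t > st.1 := lt_trans hx1 hbig
          rw [if_pos h1, if_pos h2]
          simp; omega
        · rw [if_neg hx1]
          split <;> simp <;> omega
      · -- every element of t is at most x: the max is x itself, at index 0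
        have hallt : ∀ z ∈ t, z ≤ x := by
          intro z hz
          exact le_trans (mx_ge_mem t y z hz) (by omega)
        have hxt : mx x t = x := by
          rcases mx_mem_or t x with h | h
          · exact h
          · exact le_antisymm (hallt _ h) (mx_ge t x)
        rw [hval, hxt, PySem.List.index?_cons_self]
        simp only [Option.getD_some, Nat.cast_zero, add_zero]
        by_cases hx1 : x > st.1
        · rw [if_pos hx1]
          have : ¬ mx y t > (x, i, s).1 := by simp; omega
          rw [if_neg this]
        · rw [if_neg hx1]
          have : ¬ mx y t > st.1 := by omega
          rw [if_neg this]

-- A's inner pyRange/pyGetD loop over a row with ≥ 5 entries is the enumerate-fold over its first 5 entries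
theorem inner_to_enumerate (r : List Int) (i : Int) (h : 5 ≤ r.length) (st : Int × Int × Int) :
    (PySem.List.pyRange 0 5 1).foldl
      (fun (st : Int × Int × Int) j =>
        if PySem.List.pyGetD r j 0 > st.1 then (PySem.List.pyGetD r j 0, i, j) else st) st
    = (PySem.List.enumerate (r.take 5) 0).foldl
        (fun (st : Int × Int × Int) p => if p.2 > st.1 then (p.2, i, p.1) else st) st := by
  have hlen : PySem.List.len (r.take 5) = (5 : Int) := by
    simp [PySem.List.len, List.length_take]; omega
  rw [PySem.List.enumerate_eq_map_pyRange (r.take 5) 0, hlen, List.foldl_map]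
  refine PySem.List.foldl_congr_mem _ _ _ _ ?_
  intro acc j hj
  obtain ⟨hj0, hj5⟩ := PySem.List.mem_pyRange_one.1 hj
  have h1 : j < (r.length : Int) := by omega
  have h2 : j < ((r.take 5).length : Int) := by simp; omega
  rw [PySem.List.pyGetD_eq_getElem r 0 hj0 h1, PySem.List.pyGetD_eq_getElem (r.take 5) 0 hj0 h2,
    List.getElem_take]

-- per-row equality: A's inner loop = B's row_best step
theorem row_step_eq (r : List Int) (i : Int) (h : 5 ≤ r.length) (st : Int × Int × Int) :
    (PySem.List.pyRange 0 5 1).foldl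
      (fun (st : Int × Int × Int) j =>
        if PySem.List.pyGetD r j 0 > st.1 then (PySem.List.pyGetD r j 0, i, j) else st) st
    = (if (row_best r i).1 > st.1 then row_best r i else st) := by
  rw [inner_to_enumerate r i h st]
  obtain ⟨x, l, hxl⟩ : ∃ x l, r.take 5 = x :: l := by
    cases hr : r.take 5 with
    | nil => exfalso; have := congrArg List.length hr; simp only [List.length_take, List.length_nil] at this; omega
    | cons x l => exact ⟨x, l, rfl⟩
  have hrb : row_best r i
      = (mx x l, i, (((PySem.List.index? (x :: l) (mx x l)).getD 0 : Nat) : Int)) := by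
    have hsl : PySem.List.slice r none (some (5 : Int)) = x :: l := by
      rw [PySem.List.slice_to r (by omega)]; simpa using hxl
    simp [row_best, hsl, max?_cons]
  rw [hxl, argmax_fold l x i 0 st, hrb]
  simp

-- ===== VERDICT (by name: the statement is the Claim_ definition above) =====
theorem find_max_coord_spec : Claim_equal_find_max_coord := by
  intro q _hDom hPre
  obtain ⟨hq, hrows⟩ := hPre
  unfold Spec_find_max_coord find_max_coord find_max_coord_alt
  dsimp only
  rw [List.foldl_map]
  have hcongr :
      (PySem.List.pyRange 0 5 1).foldl
        (fun (st : Int × Int × Int) i =>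
          (PySem.List.pyRange 0 5 1).foldl
            (fun (st : Int × Int × Int) j =>
              if PySem.List.pyGetD (PySem.List.pyGetD q i []) j 0 > st.1 then
                (PySem.List.pyGetD (PySem.List.pyGetD q i []) j 0, i, j)
              else st)
            st)
        ((-9999 : Int), (0 : Int), (0 : Int))
      = (PySem.List.pyRange 0 5 1).foldl
          (fun (st : Int × Int × Int) i =>
            if (row_best (PySem.List.pyGetD q i []) i).1 > st.1 then
              row_best (PySem.List.pyGetD q i []) i
            else st)
          ((-9999 : Int), (0 : Int), (0 : Int)) := by
    refine PySem.List.foldl_congr_mem _ _ _ _ ?_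
    intro acc i hi
    obtain ⟨hi0, hi5⟩ := PySem.List.mem_pyRange_one.1 hi
    have hiq : i < (q.length : Int) := by omega
    have hri : PySem.List.pyGetD q i [] = q[i.toNat] := PySem.List.pyGetD_eq_getElem q [] hi0 hiq
    have hmem : q[i.toNat] ∈ q.take 5 := by
      refine List.mem_take_iff_getElem.2 ⟨i.toNat, by omega, rfl⟩
    have hlen : 5 ≤ (PySem.List.pyGetD q i []).length := by
      rw [hri]; exact hrows _ hmem
    exact row_step_eq _ i hlen acc
  rw [hcongr]
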